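-- pv_equiv track=rewrite | github.com/Ada-Interview-Practice/longevity-problem | main.py | longest_career
-- ===== SOURCE A (Python) =====
-- def longest_career(albums):
--     # Dictionary to summarize artist info
--     # Key will be name of artist
--     # Value will be 2 element list containing the earliest and last year
--     # e.g. {"Shakira": [1991, 2017]}
--     artist_spans = {}
--
--     # Iterate over each album, unpacking the needed values
--     for artist, _, year in albums:
--         # if this is the first time we've seen the artist
--         if artist not in artist_spans:
--             # The first seen album starts off as both min and max
--             artist_spans[artist] = [year, year]
--         # if we have seen the artist before
--         else:
--             # Find the earliest and latest release for the arist so far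
--             prev_min = artist_spans[artist][0]
--             prev_max = artist_spans[artist][1]
--
--             # Update the min or max if the new year is higher or lower
--             if year < prev_min:
--                 artist_spans[artist][0] = year
--             if year > prev_max:
--                 artist_spans[artist][1] = year
--
--     best_artist = None
--     best_duration = None
--     for artist, span in artist_spans.items():
--         # Duration is latest year minus earliest year
--         duration = span[1] - span[0]
--         # If this is the longest duration we've seen
--         if best_duration is None or duration > best_duration:
--             # Update the best seen
--             best_duration = duration
--             best_artist = artist
--
--     return (best_artist, best_duration)
-- ===== SOURCE B (Python) =====
-- def longest_career(albums):
--     # No dictionary at all: collect the distinct artists in first-appearance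
--     # order, then brute-force rescan the whole album list per artist.
--     seen = []
--     for artist, _, _ in albums:
--         if artist not in seen:
--             seen.append(artist)
--     best_artist = None
--     best_duration = None
--     for artist in seen:
--         years = [y for a, _, y in albums if a == artist]
--         duration = max(years) - min(years)
--         if best_duration is None or duration > best_duration:
--             best_artist = artist
--             best_duration = duration
--     return (best_artist, best_duration)
-- ===== Notes on version B (the rewrite author's own statement) =====
-- stated objective: alternative
-- what changed: Drops the per-artist dictionary of running [min,max] spans entirely: B first builds the list of distinct artists in first-appearance order, then for each distinct artist rescans the whole album list to collect that artist's years and takes max-min, keeping the first strict maximum; a nested-scan algorithm instead of a single-pass hash aggregation.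
import Mathlib
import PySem

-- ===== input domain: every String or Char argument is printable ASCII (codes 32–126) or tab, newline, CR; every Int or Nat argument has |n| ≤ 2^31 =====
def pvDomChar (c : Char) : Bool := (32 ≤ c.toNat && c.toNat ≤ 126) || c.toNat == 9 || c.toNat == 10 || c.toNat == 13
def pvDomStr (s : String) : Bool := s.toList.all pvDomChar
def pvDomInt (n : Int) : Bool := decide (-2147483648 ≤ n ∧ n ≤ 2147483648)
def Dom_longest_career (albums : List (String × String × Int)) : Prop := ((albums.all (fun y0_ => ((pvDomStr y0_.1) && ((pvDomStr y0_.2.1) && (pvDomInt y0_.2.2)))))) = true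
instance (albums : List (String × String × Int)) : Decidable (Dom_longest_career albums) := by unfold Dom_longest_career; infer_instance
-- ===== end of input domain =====

-- B drops A's per-artist dictionary of running [min,max] spans entirely: it builds the list of
-- distinct artists in first-appearance order, then rescans the album list once per artist
-- (alternative nested-scan algorithm; not faster).


-- ===== PORT A =====
-- one iteration of A's grouping loop; the Python 2-element list [lo, hi] is ported as the
-- pair (lo, hi); the read dict[artist] is guarded by `contains`, so getD with an unused
-- default is exact; the two conditional in-place element assignments become the two ifs
def lcStepA (d : PySem.Dict String (Int × Int)) (t : String × String × Int) :
    PySem.Dict String (Int × Int) :=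
  let artist := t.1
  let year := t.2.2
  if d.contains artist then
    let prev_min := (d.getD artist (0, 0)).1
    let prev_max := (d.getD artist (0, 0)).2
    d.insert artist
      ((if year < prev_min then year else prev_min),
       (if year > prev_max then year else prev_max))
  else
    d.insert artist (year, year)

-- one iteration of A's selection loop over artist_spans.items()
def lcSelA (best : Option String × Option Int) (p : String × Int × Int) :
    Option String × Option Int :=
  let duration := p.2.2 - p.2.1
  match best.2 with
  | none => (some p.1, some duration)
  | some b => if duration > b then (some p.1, some duration) else best

def longest_career (albums : List (String × String × Int)) : Option String × Option Int :=
  ((albums.foldl lcStepA PySem.Dict.empty).items).foldl lcSelA (none, none)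

-- ===== PORT B =====
-- `if artist not in seen: seen.append(artist)`
def lcSeen (seen : List String) (t : String × String × Int) : List String :=
  if seen.contains t.1 then seen else seen ++ [t.1]

-- the comprehension `[y for a, _, y in albums if a == artist]`
def lcYears (albums : List (String × String × Int)) (artist : String) : List Int :=
  (albums.filter (fun p => p.1 == artist)).map (fun p => p.2.2)

-- one iteration of B's selection loop over the distinct-artist list; every distinct artist
-- has at least one album, so the getD 0 default of max?/min? is never taken
def lcSelB (albums : List (String × String × Int)) (best : Option String × Option Int)
    (artist : String) : Option String × Option Int :=
  let years := lcYears albums artist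
  let duration := (PySem.List.max? years (fun y => y)).getD 0
                  - (PySem.List.min? years (fun y => y)).getD 0
  match best.2 with
  | none => (some artist, some duration)
  | some b => if duration > b then (some artist, some duration) else best

def longest_career_alt (albums : List (String × String × Int)) : Option String × Option Int :=
  (albums.foldl lcSeen []).foldl (lcSelB albums) (none, none)

-- ===== PRECONDITION & SPEC =====
def Spec_longest_career (albums : List (String × String × Int)) (out : Option String × Option Int) : Prop := out = longest_career_alt albums
instance (albums : List (String × String × Int)) (out : Option String × Option Int) : Decidable (Spec_longest_career albums out) := by unfold Spec_longest_career; infer_instance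

-- ===== CLAIM (what is proved, stated in full; the proofs are below) =====
def Claim_equal_longest_career : Prop := ∀ (albums : List (String × String × Int)), Dom_longest_career albums → Spec_longest_career albums (longest_career albums)

-- ===== LEMMAS AND PROOFS =====

-- (min years, max years) of a nonempty list, as A's record represents it
def lcSpan : List Int → Int × Int
  | [] => (0, 0)
  | y :: t => (t.foldl min y, t.foldl max y)

lemma lcSpan_append (ys : List Int) (h : ys ≠ []) (y : Int) :
    lcSpan (ys ++ [y]) =
      ((if y < (lcSpan ys).1 then y else (lcSpan ys).1),
       (if y > (lcSpan ys).2 then y else (lcSpan ys).2)) := by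
  cases ys with
  | nil => exact absurd rfl h
  | cons y0 t =>
    simp only [lcSpan, List.cons_append, List.foldl_append, List.foldl_cons, List.foldl_nil,
      Prod.mk.injEq]
    refine ⟨?_, ?_⟩ <;> simp only [min_def, max_def] <;> split_ifs <;> omega

lemma get?_mk_mapf (g : String → Int × Int) (l : List String) (k : String) :
    (PySem.Dict.mk (l.map (fun a => (a, g a)))).get? k
      = if l.contains k then some (g k) else none := by
  induction l with
  | nil => rfl
  | cons a rest ih =>
    simp only [List.map_cons, PySem.Dict.get?_mk_cons, List.contains_cons]
    by_cases h : a == k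
    · have hak : a = k := beq_iff_eq.mp h
      subst hak
      simp only [beq_self_eq_true, if_true, Bool.true_or]
    · have hne : a ≠ k := fun he => h (beq_iff_eq.mpr he)
      have hka : (k == a) = false := beq_eq_false_iff_ne.mpr (Ne.symm hne)
      simp only [h, Bool.false_eq_true, if_false, ih, hka, Bool.false_or]

lemma mem_foldl_lcSeen (albums : List (String × String × Int)) :
    ∀ (s : List String) (a : String),
      a ∈ albums.foldl lcSeen s ↔ a ∈ s ∨ a ∈ albums.map (·.1) := by
  induction albums with
  | nil => intro s a; simp
  | cons t rest ih =>
    intro s a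
    simp only [List.foldl_cons, ih, lcSeen, List.map_cons, List.mem_cons]
    by_cases h : s.contains t.1
    · have hm : t.1 ∈ s := List.mem_of_elem_eq_true h
      simp only [h, if_true]
      constructor
      · rintro (h1 | h2) <;> tauto
      · rintro (h1 | h1 | h1)
        · exact Or.inl h1
        · exact Or.inl (h1 ▸ hm)
        · exact Or.inr h1
    · have h' : s.contains t.1 = false := by simpa using h
      simp only [h', Bool.false_eq_true, if_false, List.mem_append, List.mem_singleton]
      tauto

lemma lcYears_ne_nil (albums : List (String × String × Int)) (a : String)
    (h : a ∈ albums.map (·.1)) : lcYears albums a ≠ [] := by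
  obtain ⟨p, hp, hpa⟩ := List.mem_map.mp h
  have : p ∈ albums.filter (fun q => q.1 == a) := by
    simp [List.mem_filter, hp, hpa]
  intro hnil
  unfold lcYears at hnil
  rw [List.map_eq_nil_iff] at hnil
  rw [hnil] at this
  exact absurd this (List.not_mem_nil)

lemma lcYears_append (albums : List (String × String × Int)) (t : String × String × Int)
    (a : String) :
    lcYears (albums ++ [t]) a
      = lcYears albums a ++ (if t.1 == a then [t.2.2] else []) := by
  unfold lcYears
  rw [List.filter_append, List.map_append]
  by_cases h : t.1 == a <;> simp [List.filter, h]

-- the grouping loops agree: A's dict is exactly B's distinct-artist list tagged with spans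
lemma fold_eq (albums : List (String × String × Int)) :
    albums.foldl lcStepA PySem.Dict.empty
      = PySem.Dict.mk ((albums.foldl lcSeen []).map
          (fun a => (a, lcSpan (lcYears albums a)))) := by
  induction albums using List.reverseRecOn with
  | nil => rfl
  | append_singleton albums t ih =>
    rw [List.foldl_append, List.foldl_append, ih]
    simp only [List.foldl_cons, List.foldl_nil]
    by_cases hc : (albums.foldl lcSeen []).contains t.1
    · -- artist already seen: both sides update in place
      have hmemseen : t.1 ∈ albums.foldl lcSeen [] := List.mem_of_elem_eq_true hc
      have hmem : t.1 ∈ albums.map (·.1) := by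
        rcases (mem_foldl_lcSeen albums [] t.1).mp hmemseen with h | h
        · exact absurd h (List.not_mem_nil)
        · exact h
      have hne := lcYears_ne_nil albums t.1 hmem
      have hcd : (PySem.Dict.mk ((albums.foldl lcSeen []).map
            (fun a => (a, lcSpan (lcYears albums a))))).contains t.1 = true := by
        rw [PySem.Dict.contains_eq_isSome_get?, get?_mk_mapf, if_pos hc]
        rfl
      have hgd : (PySem.Dict.mk ((albums.foldl lcSeen []).map
            (fun a => (a, lcSpan (lcYears albums a))))).getD t.1 (0, 0)
          = lcSpan (lcYears albums t.1) := by
        rw [PySem.Dict.getD_eq_get?_getD, get?_mk_mapf, if_pos hc]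
        rfl
      have hseen' : lcSeen (albums.foldl lcSeen []) t = albums.foldl lcSeen [] := by
        simp only [lcSeen, hc, if_true]
      rw [hseen']
      simp only [lcStepA, hcd, if_true, hgd]
      apply PySem.Dict.ext
      rw [PySem.Dict.items_insert_of_contains _ _ hcd]
      show ((albums.foldl lcSeen []).map _).map _ = (albums.foldl lcSeen []).map _
      rw [List.map_map]
      apply List.map_congr_left
      intro a _
      by_cases hk : a = t.1
      · subst hk
        simp only [Function.comp_def, beq_self_eq_true, if_true]
        rw [lcYears_append]
        simp only [beq_self_eq_true, if_true]
        rw [lcSpan_append _ hne]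
      · have hbe : (a == t.1) = false := beq_eq_false_iff_ne.mpr hk
        have hbe' : (t.1 == a) = false := beq_eq_false_iff_ne.mpr (fun h => hk h.symm)
        simp only [Function.comp_def, hbe, Bool.false_eq_true, if_false]
        rw [lcYears_append, hbe', if_neg (by simp), List.append_nil]
    · -- first occurrence: both sides append a fresh entry
      have hc' : (albums.foldl lcSeen []).contains t.1 = false := by simpa using hc
      have hnmemseen : t.1 ∉ albums.foldl lcSeen [] := by
        intro h
        exact hc (List.elem_eq_true_of_mem h)
      have hnmem : t.1 ∉ albums.map (·.1) := by
        intro h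
        exact hnmemseen ((mem_foldl_lcSeen albums [] t.1).mpr (Or.inr h))
      have hcd : (PySem.Dict.mk ((albums.foldl lcSeen []).map
            (fun a => (a, lcSpan (lcYears albums a))))).contains t.1 = false := by
        rw [PySem.Dict.contains_eq_isSome_get?, get?_mk_mapf, if_neg hc]
        rfl
      have hseen' : lcSeen (albums.foldl lcSeen []) t = albums.foldl lcSeen [] ++ [t.1] := by
        simp only [lcSeen, hc', Bool.false_eq_true, if_false]
      rw [hseen']
      simp only [lcStepA, hcd, Bool.false_eq_true, if_false]
      apply PySem.Dict.ext
      rw [PySem.Dict.items_insert_of_not_contains _ _ hcd]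
      show (albums.foldl lcSeen []).map _ ++ _ = ((albums.foldl lcSeen []) ++ [t.1]).map _
      rw [List.map_append]
      congr 1
      · apply List.map_congr_left
        intro a ha
        have hk : ¬ t.1 = a := by
          intro h
          exact hnmemseen (h ▸ ha)
        have hbe' : (t.1 == a) = false := beq_eq_false_iff_ne.mpr hk
        rw [lcYears_append, hbe', if_neg (by simp), List.append_nil]
      · have hy0 : lcYears albums t.1 = [] := by
          unfold lcYears
          rw [List.map_eq_nil_iff, List.filter_eq_nil_iff]
          intro p hp
          simp only [beq_iff_eq]
          intro h
          exact hnmem (List.mem_map.mpr ⟨p, hp, h⟩)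
        simp only [List.map_cons, List.map_nil]
        rw [lcYears_append, hy0]
        simp only [beq_self_eq_true, if_true, List.nil_append]
        rfl

-- the selection loops agree element by element
lemma sel_eq (albums : List (String × String × Int)) (l : List String) :
    ∀ best, (∀ a ∈ l, lcYears albums a ≠ []) →
      (l.map (fun a => (a, lcSpan (lcYears albums a)))).foldl lcSelA best
        = l.foldl (lcSelB albums) best := by
  induction l with
  | nil => intro best _; rfl
  | cons a rest ih =>
    intro best hne
    simp only [List.map_cons, List.foldl_cons]
    have hstep : lcSelA best (a, lcSpan (lcYears albums a)) = lcSelB albums best a := by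
      obtain ⟨y0, ys, hyt⟩ : ∃ y0 ys, lcYears albums a = y0 :: ys := by
        cases h : lcYears albums a with
        | nil => exact absurd h (hne a (by simp))
        | cons x xs => exact ⟨x, xs, rfl⟩
      simp only [lcSelA, lcSelB, hyt, lcSpan,
        PySem.List.max?_id_cons, PySem.List.min?_id_cons, Option.getD_some]
    rw [hstep]
    exact ih _ (fun q hq => hne q (by simp [hq]))

-- ===== VERDICT (by name: the statement is the Claim_ definition above) =====
theorem longest_career_spec : Claim_equal_longest_career := by
  intro albums _
  unfold Spec_longest_career longest_career longest_career_alt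
  rw [fold_eq]
  show ((((albums.foldl lcSeen []).map _)).foldl lcSelA (none, none)) = _
  apply sel_eq
  intro a ha
  exact lcYears_ne_nil albums a (by
    simpa using (mem_foldl_lcSeen albums [] a).mp ha)
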